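-- pv_equiv track=rewrite | github.com/saharc2000/NLP_Construct-State_Classifier | Vectors.py | make_vector27
-- ===== SOURCE A (Python) =====
-- def find_dict_in_shift_from_smixut(sentence, shift, smixut):
--     i=0
--     punctuation = r"\"#$%&'()*+,-–./:;<=>?@[\]^_`{|}~"
--     for word_dict in sentence:
--         if (smixut in word_dict.get("word")) and (0 < i+shift < len(sentence)):
--             if(sentence[i+shift].get("word") in punctuation):
--                 if(shift > 0):
--                     return find_dict_in_shift_from_smixut(sentence, shift+1, smixut)
--                 else:
--                     return find_dict_in_shift_from_smixut(sentence, shift-1, smixut)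
--             else:
--                 return sentence[i+shift]
--         i+=1
--     return "err"
--
-- def get_unique_dep_func():
--     unique_dep_funcs = {
--         "nsubj": 0,  # Nominal Subject
--         "obj": 1,  # Object
--         "obl": 2,  # Oblique
--         "advmod": 3,  # Adverbial Modifier
--         "acl:relcl": 4,  # Relative Clause Modifier
--         "compound:smixut": 5,  # Compound Smixut
--         "cop": 6,  # Copula
--         "punct": 7  # Punctuation
--     }
--
--     return unique_dep_funcs
--
-- def make_vector27(smixut_list, sentences):
--     # Create a list to store the resulting vectors
--     dep_func_vectors = []
--     unique_dep_funcs = get_unique_dep_func()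
--
--     for i, smixut in enumerate(smixut_list):
--         if i >= len(sentences):
--             break
--
--         word1, word2 = smixut.split(' ', 1)
--
--         # Initialize the vector with zeros
--         vector = [0] * (2 * len(unique_dep_funcs))
--
--         # Process the word before the smixut
--         word_before = find_dict_in_shift_from_smixut(sentences[i], -1, word1)
--         if word_before != "err":
--             dep_func_before = word_before.get("dep_func")
--             if dep_func_before in unique_dep_funcs:
--                 vector[unique_dep_funcs[dep_func_before]] = 1
--
--         # Process the word after the smixut
--         word_after = find_dict_in_shift_from_smixut(sentences[i], 1, word2)
--         if word_after != "err":
--             dep_func_after = word_after.get("dep_func")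
--             if dep_func_after in unique_dep_funcs:
--                 vector[len(unique_dep_funcs) + unique_dep_funcs[dep_func_after]] = 1
--
--         # Append the vector to the list of vectors
--         dep_func_vectors.append(vector)
--
--     return dep_func_vectors
-- ===== SOURCE B (Python) =====
-- def get_unique_dep_func():
--     return {
--         "nsubj": 0, "obj": 1, "obl": 2, "advmod": 3,
--         "acl:relcl": 4, "compound:smixut": 5, "cop": 6, "punct": 7,
--     }
--
--
-- def find_dict_in_shift_from_smixut(sentence, shift, smixut):
--     punctuation = r"\"#$%&'()*+,-–./:;<=>?@[\]^_`{|}~"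
--     n = len(sentence)
--     while -n <= shift <= n:
--         j = next((k for k, wd in enumerate(sentence)
--                   if smixut in wd.get("word") and 0 < k + shift < n), None)
--         if j is None:
--             return "err"
--         target = sentence[j + shift]
--         if target.get("word") in punctuation:
--             shift += 1 if shift > 0 else -1
--         else:
--             return target
--     return "err"
--
--
-- def make_vector27(smixut_list, sentences):
--     funcs = get_unique_dep_func()
--     m = len(funcs)
--     out = []
--     for smixut, sentence in zip(smixut_list, sentences):
--         word1, word2 = smixut.split(' ', 1)
--         vector = [0] * (2 * m)
--         for base, word, shift in ((0, word1, -1), (m, word2, 1)):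
--             d = find_dict_in_shift_from_smixut(sentence, shift, word)
--             if d != "err":
--                 k = funcs.get(d.get("dep_func"))
--                 if k is not None:
--                     vector[base + k] = 1
--         out.append(vector)
--     return out
-- ===== Notes on version B (the rewrite author's own statement) =====
-- stated objective: alternative
-- what changed: find_dict_in_shift_from_smixut's self-recursive punctuation skipping is replaced by an explicit bounded while-loop over shift values whose body finds the first valid match with a lazy next(...) scan, and the enumerate/break outer loop is replaced by zip with a small loop over (base, word, shift) pairs.
import Mathlib
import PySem

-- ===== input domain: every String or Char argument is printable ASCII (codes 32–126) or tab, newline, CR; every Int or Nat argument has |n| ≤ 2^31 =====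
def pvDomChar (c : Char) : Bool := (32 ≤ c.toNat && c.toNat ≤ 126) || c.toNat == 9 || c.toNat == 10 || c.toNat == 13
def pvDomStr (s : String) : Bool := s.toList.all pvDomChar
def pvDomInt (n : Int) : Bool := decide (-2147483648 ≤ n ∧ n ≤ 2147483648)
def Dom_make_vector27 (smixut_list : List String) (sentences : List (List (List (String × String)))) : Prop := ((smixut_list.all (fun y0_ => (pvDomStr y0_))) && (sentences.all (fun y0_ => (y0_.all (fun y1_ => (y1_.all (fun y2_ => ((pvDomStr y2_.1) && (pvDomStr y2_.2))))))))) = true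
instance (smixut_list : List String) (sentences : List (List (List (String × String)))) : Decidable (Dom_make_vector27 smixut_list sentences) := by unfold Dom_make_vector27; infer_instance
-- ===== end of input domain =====

-- B replaces A's self-recursive punctuation skipping by an explicit bounded while-loop over shift
-- values whose body finds the first valid match with a lazy next(...) scan, and replaces the
-- index/break outer loop by zip; same return value on every admitted input
-- (objective: alternative decomposition, no speed claim).

-- d.get(k) on a Python dict modelled as an insertion-order association list
def pvGetKey (d : List (String × String)) (k : String) : Option String :=
  (PySem.Dict.ofList d).get? k

-- the raw-string punctuation constant of A (and B): backslash, quote, …, en dash included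
def pvPunct : String := "\\\"#$%&'()*+,-–./:;<=>?@[\\]^_`{|}~"

-- ===== PORT A =====
-- the for-loop scan of find_dict_in_shift_from_smixut: first index i with
-- (smixut in word_i) and 0 < i+shift < len(sentence); Pre_ guarantees "word" keys, getD "" is the
-- off-Pre_ total default
def pvScanA (full : List (List (String × String))) (shift : Int) (smixut : String) :
    List (List (String × String)) → Int → Option Int
  | [], _ => none
  | d :: rest, i =>
    if PySem.Str.isIn smixut ((pvGetKey d "word").getD "") && decide (0 < i + shift)
        && decide (i + shift < (full.length : Int)) then some i
    else pvScanA full shift smixut rest (i + 1)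

-- find_dict_in_shift_from_smixut: none = "err"; the fuel argument only makes the
-- self-recursion structurally total (it never runs out: each recursion needs a scan hit,
-- which forces |shift| < len, and |shift| grows by 1 each call)
def pvFindAF (sentence : List (List (String × String))) (smixut : String) :
    Nat → Int → Option (List (String × String))
  | 0, _ => none
  | fuel + 1, shift =>
    match pvScanA sentence shift smixut sentence 0 with
    | none => none
    | some i =>
      match PySem.List.pyGet? sentence (i + shift) with
      | none => none   -- unreachable: pvScanA guarantees 0 < i+shift < len
      | some tgt =>
        if PySem.Str.isIn ((pvGetKey tgt "word").getD "") pvPunct then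
          pvFindAF sentence smixut fuel (if shift > 0 then shift + 1 else shift - 1)
        else some tgt

def pvFindA (sentence : List (List (String × String))) (shift : Int) (smixut : String) :
    Option (List (String × String)) :=
  pvFindAF sentence smixut (sentence.length + 2) shift

def pvFuncsA : PySem.Dict String Nat :=
  PySem.Dict.ofList [("nsubj", 0), ("obj", 1), ("obl", 2), ("advmod", 3),
    ("acl:relcl", 4), ("compound:smixut", 5), ("cop", 6), ("punct", 7)]

-- one iteration of A's main loop body (the vector for one smixut/sentence pair);
-- the two near-identical update blocks of A's body are transliterated as the two helpers below
def pvSetBefore (vector : List Int) (word_before : Option (List (String × String))) : List Int :=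
  match word_before with
  | none => vector
  | some wb =>
    match pvGetKey wb "dep_func" with
    | none => vector
    | some df => if pvFuncsA.contains df then vector.set (pvFuncsA.getD df 0) 1 else vector

def pvSetAfter (vector : List Int) (word_after : Option (List (String × String))) : List Int :=
  match word_after with
  | none => vector
  | some wa =>
    match pvGetKey wa "dep_func" with
    | none => vector
    | some df =>
      if pvFuncsA.contains df then vector.set (pvFuncsA.size + pvFuncsA.getD df 0) 1 else vector

def pvRowA (sentence : List (List (String × String))) (smixut : String) : List Int :=
  let parts := (PySem.Str.splitMax? smixut " " 1).getD []
  let word1 := parts.getD 0 ""     -- Pre_ guarantees a space, hence two parts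
  let word2 := parts.getD 1 ""
  let vector : List Int := List.replicate (2 * pvFuncsA.size) 0
  let vector := pvSetBefore vector (pvFindA sentence (-1) word1)
  pvSetAfter vector (pvFindA sentence 1 word2)

-- the enumerate loop with its 'break' at i >= len(sentences)
def pvGoA (sentences : List (List (List (String × String)))) :
    List String → Int → List (List Int)
  | [], _ => []
  | s :: rest, i =>
    if (sentences.length : Int) ≤ i then []
    else pvRowA ((PySem.List.pyGet? sentences i).getD []) s :: pvGoA sentences rest (i + 1)

def make_vector27 (smixut_list : List String) (sentences : List (List (List (String × String)))) : List (List Int) :=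
  pvGoA sentences smixut_list 0

-- ===== PORT B =====
-- the lazy next((k for k, wd in enumerate(sentence) if …), None) inner scan of B
def pvScanB (sentence : List (List (String × String))) (shift : Int) (smixut : String) :
    Option Int :=
  ((PySem.List.enumerate sentence 0).find?
    (fun p => PySem.Str.isIn smixut ((pvGetKey p.2 "word").getD "") && decide (0 < p.1 + shift)
        && decide (p.1 + shift < (sentence.length : Int)))).map (·.1)

-- the while -n <= shift <= n loop of B (fuel is only a structural totality guard;
-- the while condition itself bounds the number of passes)
def pvLoopB (sentence : List (List (String × String))) (smixut : String) (n : Int) :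
    Nat → Int → Option (List (String × String))
  | 0, _ => none
  | fuel + 1, shift =>
    if -n ≤ shift ∧ shift ≤ n then
      match pvScanB sentence shift smixut with
      | none => none
      | some j =>
        let target := (PySem.List.pyGet? sentence (j + shift)).getD []
        if PySem.Str.isIn ((pvGetKey target "word").getD "") pvPunct then
          pvLoopB sentence smixut n fuel (if shift > 0 then shift + 1 else shift - 1)
        else some target
    else none

def pvFindB (sentence : List (List (String × String))) (shift : Int) (smixut : String) :
    Option (List (String × String)) :=
  pvLoopB sentence smixut (sentence.length : Int) (sentence.length + 2) shift

def pvFuncsB : PySem.Dict String Nat :=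
  PySem.Dict.ofList [("nsubj", 0), ("obj", 1), ("obl", 2), ("advmod", 3),
    ("acl:relcl", 4), ("compound:smixut", 5), ("cop", 6), ("punct", 7)]

-- the body of B's for-loop over ((0, word1, -1), (m, word2, 1))
def pvStepB (sentence : List (List (String × String))) (vector : List Int)
    (t : Nat × String × Int) : List Int :=
  match pvFindB sentence t.2.2 t.2.1 with
  | none => vector
  | some d =>
    match pvGetKey d "dep_func" with
    | none => vector
    | some df =>
      match pvFuncsB.get? df with
      | none => vector
      | some k => vector.set (t.1 + k) 1

def pvRowB (sentence : List (List (String × String))) (smixut : String) : List Int :=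
  let parts := (PySem.Str.splitMax? smixut " " 1).getD []
  let word1 := parts.getD 0 ""
  let word2 := parts.getD 1 ""
  let m := pvFuncsB.size
  [(0, word1, (-1 : Int)), (m, word2, (1 : Int))].foldl (pvStepB sentence)
    (List.replicate (2 * m) 0)

def make_vector27_alt (smixut_list : List String) (sentences : List (List (List (String × String)))) : List (List Int) :=
  (smixut_list.zip sentences).map (fun p => pvRowB p.2 p.1)

-- ===== PRECONDITION & SPEC =====
-- Pre_ excludes the inputs on which Python A raises: a smixut (paired with a sentence) without a
-- space makes the two-target unpack of split raise ValueError, and a word-dict without a "word" key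
-- makes `smixut in wd.get("word")` raise TypeError whenever a scan reaches it (A returns despite
-- such a dict only when every scan accidentally stops earlier; B behaves identically there — see
-- cites). The per-dict "word"-key condition is the natural closed-form superset of that raise set.
def Pre_make_vector27 (smixut_list : List String) (sentences : List (List (List (String × String)))) : Prop :=
  ((smixut_list.zip sentences).all (fun p =>
    PySem.Str.isIn " " p.1 && p.2.all (fun wd => ((PySem.Dict.ofList wd).get? "word").isSome))) = true
instance (smixut_list : List String) (sentences : List (List (List (String × String)))) : Decidable (Pre_make_vector27 smixut_list sentences) := by unfold Pre_make_vector27; infer_instance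

def pvWitness_make_vector27 : List String × (List (List (List (String × String)))) :=
  (["a b"], [[[("word", "a b")]]])

def Spec_make_vector27 (smixut_list : List String) (sentences : List (List (List (String × String)))) (out : List (List Int)) : Prop := out = make_vector27_alt smixut_list sentences
instance (smixut_list : List String) (sentences : List (List (List (String × String)))) (out : List (List Int)) : Decidable (Spec_make_vector27 smixut_list sentences out) := by unfold Spec_make_vector27; infer_instance

-- ===== CLAIM (what is proved, stated in full; the proofs are below) =====
def Claim_equal_make_vector27 : Prop := ∀ (smixut_list : List String) (sentences : List (List (List (String × String)))), Dom_make_vector27 smixut_list sentences → Pre_make_vector27 smixut_list sentences → Spec_make_vector27 smixut_list sentences (make_vector27 smixut_list sentences)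

-- ===== LEMMAS AND PROOFS =====

theorem pvScanA_some_bounds (full : List (List (String × String))) (shift : Int) (smixut : String) :
    ∀ (rest : List (List (String × String))) (i j : Int),
      pvScanA full shift smixut rest i = some j →
      i ≤ j ∧ j < i + rest.length ∧ 0 < j + shift ∧ j + shift < (full.length : Int) := by
  intro rest
  induction rest with
  | nil => intro i j h; simp [pvScanA] at h
  | cons d rest ih =>
    intro i j h
    simp only [pvScanA] at h
    split at h
    · rename_i hc
      cases h
      simp only [Bool.and_eq_true, decide_eq_true_eq] at hc
      simp only [List.length_cons]
      exact ⟨le_refl _, by omega, hc.1.2, hc.2⟩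
    · have := ih (i + 1) j h
      simp only [List.length_cons]
      omega

-- A's scan is B's find?-over-enumerate scan
theorem pvScanA_eq_find? (full : List (List (String × String))) (shift : Int) (smixut : String) :
    ∀ (rest : List (List (String × String))) (i : Int),
      pvScanA full shift smixut rest i =
        ((PySem.List.enumerate rest i).find?
          (fun p => PySem.Str.isIn smixut ((pvGetKey p.2 "word").getD "") && decide (0 < p.1 + shift)
              && decide (p.1 + shift < (full.length : Int)))).map (·.1) := by
  intro rest
  induction rest with
  | nil => intro i; simp [pvScanA, PySem.List.enumerate_nil]
  | cons d rest ih =>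
    intro i
    simp only [pvScanA, PySem.List.enumerate_cons, List.find?_cons, PySem.Str.isIn_eq]
    by_cases hc : (PySem.Chars.isIn smixut.toList ((pvGetKey d "word").getD "").toList
        && decide (0 < i + shift) && decide (i + shift < (full.length : Int))) = true
    · simp [hc]
    · simp only [Bool.not_eq_true] at hc
      simp only [hc]
      simp only [Bool.and_eq_true, decide_eq_true_eq, Bool.and_eq_false_iff,
        decide_eq_false_iff_not] at hc ⊢
      rw [if_neg (by tauto)]
      have := ih (i + 1)
      simpa [PySem.Str.isIn_eq] using this

theorem pvFindAF_eq_pvLoopB (sentence : List (List (String × String))) (smixut : String) :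
    ∀ (fuel : Nat) (shift : Int),
      pvFindAF sentence smixut fuel shift =
        pvLoopB sentence smixut (sentence.length : Int) fuel shift := by
  intro fuel
  induction fuel with
  | zero => intro shift; rfl
  | succ f ih =>
    intro shift
    simp only [pvFindAF, pvLoopB]
    cases hscan : pvScanA sentence shift smixut sentence 0 with
    | none =>
      dsimp only
      have hB : pvScanB sentence shift smixut = none := by
        rw [pvScanB, ← pvScanA_eq_find?]; exact hscan
      by_cases hg : -(sentence.length : Int) ≤ shift ∧ shift ≤ (sentence.length : Int)
      · rw [if_pos hg, hB]
      · rw [if_neg hg]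
    | some i =>
      dsimp only
      obtain ⟨h0, hlen, h1, h2⟩ := pvScanA_some_bounds sentence shift smixut sentence 0 i hscan
      have hB : pvScanB sentence shift smixut = some i := by
        rw [pvScanB, ← pvScanA_eq_find?]; exact hscan
      rw [if_pos (show -(sentence.length : Int) ≤ shift ∧ shift ≤ (sentence.length : Int) by omega),
        hB]
      simp only [PySem.List.pyGet?_eq_some_getElem sentence (show (0 : Int) ≤ i + shift from by omega) h2,
        Option.getD_some]
      by_cases hp : PySem.Str.isIn ((pvGetKey sentence[(i + shift).toNat] "word").getD "") pvPunct = true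
      · rw [if_pos hp, if_pos hp]
        exact ih _
      · rw [if_neg hp, if_neg hp]

theorem pvFindA_eq_pvFindB (sentence : List (List (String × String))) (smixut : String)
    (shift : Int) : pvFindA sentence shift smixut = pvFindB sentence shift smixut := by
  rw [pvFindA, pvFindB]
  exact pvFindAF_eq_pvLoopB sentence smixut (sentence.length + 2) shift

theorem pvSetBefore_eq (sentence : List (List (String × String))) (v : List Int) (w : String) :
    pvSetBefore v (pvFindB sentence (-1) w) = pvStepB sentence v (0, w, (-1 : Int)) := by
  unfold pvSetBefore pvStepB
  cases hr : pvFindB sentence (-1) w with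
  | none => simp only [hr]
  | some wb =>
    simp only [hr]
    cases hk : pvGetKey wb "dep_func" with
    | none => simp only [hk]
    | some df =>
      simp only [hk]
      cases hq : pvFuncsB.get? df with
      | none =>
        have hc : pvFuncsA.contains df = false := by
          rw [PySem.Dict.contains_eq_isSome_get?]
          rw [show pvFuncsA.get? df = pvFuncsB.get? df from rfl, hq]; rfl
        simp [hc]
      | some k =>
        have hc : pvFuncsA.contains df = true := by
          rw [PySem.Dict.contains_eq_isSome_get?]
          rw [show pvFuncsA.get? df = pvFuncsB.get? df from rfl, hq]; rfl
        have hd : pvFuncsA.getD df 0 = k := by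
          rw [PySem.Dict.getD_eq_get?_getD]
          rw [show pvFuncsA.get? df = pvFuncsB.get? df from rfl, hq]; rfl
        simp [hc, hd]

theorem pvSetAfter_eq (sentence : List (List (String × String))) (v : List Int) (w : String) :
    pvSetAfter v (pvFindB sentence 1 w) = pvStepB sentence v (pvFuncsB.size, w, (1 : Int)) := by
  unfold pvSetAfter pvStepB
  cases hr : pvFindB sentence 1 w with
  | none => simp only [hr]
  | some wa =>
    simp only [hr]
    cases hk : pvGetKey wa "dep_func" with
    | none => simp only [hk]
    | some df =>
      simp only [hk]
      cases hq : pvFuncsB.get? df with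
      | none =>
        have hc : pvFuncsA.contains df = false := by
          rw [PySem.Dict.contains_eq_isSome_get?]
          rw [show pvFuncsA.get? df = pvFuncsB.get? df from rfl, hq]; rfl
        simp [hc]
      | some k =>
        have hc : pvFuncsA.contains df = true := by
          rw [PySem.Dict.contains_eq_isSome_get?]
          rw [show pvFuncsA.get? df = pvFuncsB.get? df from rfl, hq]; rfl
        have hd : pvFuncsA.getD df 0 = k := by
          rw [PySem.Dict.getD_eq_get?_getD]
          rw [show pvFuncsA.get? df = pvFuncsB.get? df from rfl, hq]; rfl
        simp [hc, hd, show pvFuncsA.size = pvFuncsB.size from rfl]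

theorem pvRowA_eq_pvRowB (sentence : List (List (String × String))) (smixut : String) :
    pvRowA sentence smixut = pvRowB sentence smixut := by
  simp only [pvRowA, pvRowB, List.foldl_cons, List.foldl_nil, pvFindA_eq_pvFindB]
  rw [pvSetBefore_eq, pvSetAfter_eq]
  rfl

theorem pvGoA_eq_zip (sentences : List (List (List (String × String)))) :
    ∀ (sl : List String) (i : Nat),
      pvGoA sentences sl (i : Int) =
        (sl.zip (sentences.drop i)).map (fun p => pvRowB p.2 p.1) := by
  intro sl
  induction sl with
  | nil => intro i; simp [pvGoA]
  | cons s rest ih =>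
    intro i
    simp only [pvGoA]
    by_cases h : (sentences.length : Int) ≤ (i : Int)
    · rw [if_pos h]
      have hnil : sentences.drop i = [] := List.drop_eq_nil_of_le (by exact_mod_cast h)
      simp [hnil]
    · rw [if_neg h]
      have hi : i < sentences.length := by exact_mod_cast not_le.mp h
      rw [List.drop_eq_getElem_cons hi]
      simp only [List.zip_cons_cons, List.map_cons]
      congr 1
      · rw [PySem.List.pyGet?_natCast, List.getElem?_eq_getElem hi]
        exact pvRowA_eq_pvRowB _ _
      · have hcast : ((i : Int) + 1) = ((i + 1 : Nat) : Int) := by push_cast; ring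
        rw [hcast]
        exact ih (i + 1)

-- ===== VERDICT (by name: the statement is the Claim_ definition above) =====
theorem make_vector27_spec : Claim_equal_make_vector27 := by
  intro sl ss _ _
  unfold Spec_make_vector27 make_vector27 make_vector27_alt
  have := pvGoA_eq_zip ss sl 0
  simpa using this
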